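-- pv_equiv track=rewrite | github.com/CasparMensing/OCFHM | object_centric_flexible_heuristic_miner.py | getClosestPredecessor
-- ===== SOURCE A (Python) =====
-- def getClosestPredecessor(log, position, activity, activityList, objectType, predecessors):
--     if position == 0:
--         return None, None
--     else:
--         if len(predecessors) == 0:
--             return None, None
--         else:
--             for i in range(position-1, -1, -1):
--                 if activityList[i] in predecessors:
--                     return activityList[i], i
--             return None, None
-- ===== SOURCE B (Python) =====
-- def getClosestPredecessor(log, position, activity, activityList, objectType, predecessors):
--     preds = set(predecessors)
--     result = (None, None)
--     for i in range(position):
--         if activityList[i] in preds: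
--             result = (activityList[i], i)
--     return result
-- ===== Notes on version B (the rewrite author's own statement) =====
-- stated objective: alternative
-- what changed: Backward early-return scan with position==0 and empty-predecessors guards replaced by a guard-free forward pass over indices 0..position-1 that keeps a last-match-wins accumulator over a prebuilt set of predecessors.
-- outside the precondition, e.g. on getClosestPredecessor([], 5, 'a', ['x'], 'o', []): A returns (None, None), B raises IndexError
import Mathlib
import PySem

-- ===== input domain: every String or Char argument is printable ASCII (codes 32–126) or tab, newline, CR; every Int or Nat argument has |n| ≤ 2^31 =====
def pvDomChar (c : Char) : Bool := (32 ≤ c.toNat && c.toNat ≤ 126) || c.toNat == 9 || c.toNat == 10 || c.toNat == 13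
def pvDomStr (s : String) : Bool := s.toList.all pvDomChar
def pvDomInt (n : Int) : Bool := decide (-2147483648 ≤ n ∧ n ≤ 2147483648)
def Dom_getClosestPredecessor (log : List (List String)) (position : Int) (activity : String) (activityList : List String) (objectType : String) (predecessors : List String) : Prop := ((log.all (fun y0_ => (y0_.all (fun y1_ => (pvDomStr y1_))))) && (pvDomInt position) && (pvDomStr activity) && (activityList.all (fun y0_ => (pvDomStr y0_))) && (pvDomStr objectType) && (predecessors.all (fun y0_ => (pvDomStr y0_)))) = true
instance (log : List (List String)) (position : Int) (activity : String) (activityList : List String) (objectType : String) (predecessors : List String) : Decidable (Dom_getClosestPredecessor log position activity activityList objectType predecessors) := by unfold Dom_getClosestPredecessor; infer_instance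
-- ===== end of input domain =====

-- B replaces A's backward early-return scan (with its two guards) by a guard-free forward
-- pass keeping a last-match-wins accumulator over a prebuilt set of predecessors (objective: alternative).

-- ===== PORT A =====
-- for i in range(position-1, -1, -1): countdown over indices position-1 .. 0;
-- the 'none' branch of pyGet? is Python's IndexError (excluded by Pre_).
def pvLoopA (activityList predecessors : List String) : Nat → Option String × Option Int
  | 0 => (none, none)
  | k+1 =>
    match PySem.List.pyGet? activityList (k : Int) with
    | some a => if predecessors.contains a then (some a, some (k : Int)) else pvLoopA activityList predecessors k
    | none => (none, none)

def getClosestPredecessor (log : List (List String)) (position : Int) (activity : String) (activityList : List String) (objectType : String) (predecessors : List String) : Option String × Option Int :=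
  if position == 0 then (none, none)
  else if predecessors.length == 0 then (none, none)
  else pvLoopA activityList predecessors position.toNat

-- ===== PORT B =====
-- one forward fold over range(position); the out-of-range case keeps the accumulator
-- (in Python B it raises; those inputs are excluded by Pre_).
def pvStepB (activityList : List String) (preds : PySem.Set String) (acc : Option String × Option Int) (i : Nat) : Option String × Option Int :=
  match PySem.List.pyGet? activityList (i : Int) with
  | some a => if PySem.Set.contains preds a then (some a, some (i : Int)) else acc
  | none => acc

def getClosestPredecessor_alt (log : List (List String)) (position : Int) (activity : String) (activityList : List String) (objectType : String) (predecessors : List String) : Option String × Option Int :=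
  (List.range position.toNat).foldl (pvStepB activityList (PySem.Set.ofList predecessors)) (none, none)

-- ===== PRECONDITION & SPEC =====
-- Pre_ excludes position > len(activityList): there A raises IndexError when predecessors is
-- nonempty, and when predecessors is empty A's guard returns (None,None) while B itself raises.
def Pre_getClosestPredecessor (log : List (List String)) (position : Int) (activity : String) (activityList : List String) (objectType : String) (predecessors : List String) : Prop :=
  position ≤ (activityList.length : Int)
instance (log : List (List String)) (position : Int) (activity : String) (activityList : List String) (objectType : String) (predecessors : List String) : Decidable (Pre_getClosestPredecessor log position activity activityList objectType predecessors) := by unfold Pre_getClosestPredecessor; infer_instance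

def pvWitness_getClosestPredecessor : List (List String) × Int × String × List String × String × List String :=
  ([["a", "b"]], 2, "b", ["a", "b", "c"], "o", ["a"])

def Spec_getClosestPredecessor (log : List (List String)) (position : Int) (activity : String) (activityList : List String) (objectType : String) (predecessors : List String) (out : Option String × Option Int) : Prop := out = getClosestPredecessor_alt log position activity activityList objectType predecessors
instance (log : List (List String)) (position : Int) (activity : String) (activityList : List String) (objectType : String) (predecessors : List String) (out : Option String × Option Int) : Decidable (Spec_getClosestPredecessor log position activity activityList objectType predecessors out) := by unfold Spec_getClosestPredecessor; infer_instance

-- ===== CLAIM (what is proved, stated in full; the proofs are below) =====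
def Claim_equal_getClosestPredecessor : Prop := ∀ (log : List (List String)) (position : Int) (activity : String) (activityList : List String) (objectType : String) (predecessors : List String), Dom_getClosestPredecessor log position activity activityList objectType predecessors → Pre_getClosestPredecessor log position activity activityList objectType predecessors → Spec_getClosestPredecessor log position activity activityList objectType predecessors (getClosestPredecessor log position activity activityList objectType predecessors)

-- ===== LEMMAS AND PROOFS =====

theorem pv_witness_ok : Dom_getClosestPredecessor (pvWitness_getClosestPredecessor.1) (pvWitness_getClosestPredecessor.2.1) (pvWitness_getClosestPredecessor.2.2.1) (pvWitness_getClosestPredecessor.2.2.2.1) (pvWitness_getClosestPredecessor.2.2.2.2.1) (pvWitness_getClosestPredecessor.2.2.2.2.2) ∧ Pre_getClosestPredecessor (pvWitness_getClosestPredecessor.1) (pvWitness_getClosestPredecessor.2.1) (pvWitness_getClosestPredecessor.2.2.1) (pvWitness_getClosestPredecessor.2.2.2.1) (pvWitness_getClosestPredecessor.2.2.2.2.1) (pvWitness_getClosestPredecessor.2.2.2.2.2) := by decide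

-- membership in the built set agrees with list membership
theorem pv_set_contains (predecessors : List String) (a : String) :
    PySem.Set.contains (PySem.Set.ofList predecessors) a = predecessors.contains a := by
  simp [PySem.Set.contains, PySem.Set.mem_ofList]

-- with an empty predecessor set the forward fold never overwrites the accumulator
theorem pv_fold_empty (activityList : List String) (l : List Nat) (acc : Option String × Option Int) :
    l.foldl (pvStepB activityList (PySem.Set.ofList [])) acc = acc := by
  induction l generalizing acc with
  | nil => rfl
  | cons i t ih =>
    simp only [List.foldl_cons, pvStepB]
    cases h : PySem.List.pyGet? activityList (i : Int) with
    | none => exact ih acc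
    | some a => exact ih acc

-- backward first-match scan = forward last-match fold, for in-range index counts
theorem pv_loop_eq_fold (activityList predecessors : List String) (n : Nat)
    (hn : n ≤ activityList.length) :
    pvLoopA activityList predecessors n =
      (List.range n).foldl (pvStepB activityList (PySem.Set.ofList predecessors)) (none, none) := by
  induction n with
  | zero => rfl
  | succ k ih =>
    have hk : k < activityList.length := Nat.lt_of_lt_of_le (Nat.lt_succ_self k) hn
    have hget : PySem.List.pyGet? activityList (k : Int) = some (activityList[k]) := by
      rw [PySem.List.pyGet?_natCast]; exact List.getElem?_eq_getElem hk
    rw [List.range_succ, List.foldl_append, ← ih (Nat.le_of_succ_le hn)]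
    simp only [List.foldl_cons, List.foldl_nil, pvStepB, pvLoopA, hget, pv_set_contains]

-- ===== VERDICT (by name: the statement is the Claim_ definition above) =====
theorem getClosestPredecessor_spec : Claim_equal_getClosestPredecessor := by
  intro log position activity activityList objectType predecessors _ hpre
  unfold Spec_getClosestPredecessor getClosestPredecessor getClosestPredecessor_alt
  have hn : position.toNat ≤ activityList.length := by
    unfold Pre_getClosestPredecessor at hpre; omega
  by_cases h0 : position = 0
  · subst h0; simp
  · simp only [beq_iff_eq, h0, if_false]
    by_cases hp : predecessors = []
    · subst hp; exact (pv_fold_empty activityList (List.range position.toNat) (none, none)).symm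
    · have : predecessors.length ≠ 0 := by simpa using hp
      simp only [this, if_false]
      exact pv_loop_eq_fold activityList predecessors position.toNat hn
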